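-- pv_equiv track=rewrite | github.com/AP-MI-2021/lab-3-RaresSabau | main.py | get_longest_same_div_count
-- ===== SOURCE A (Python) =====
-- def nr_div(n):
--     """
--     determina numarul de divizori ai unui nr
--     """
--     k = 0
--     for i in range (1,n+1):
--         if n % i == 0:
--             k = k + 1
--     return k
--
-- def get_longest_same_div_count(lst):
--     """
--     determina cea mai lunga subsecv de numere care au acelasi nr de divizori
--     """
--     l = len(lst)
--     result = []
--     for i in range (l):
--         for j in range (i,l):
--             k = nr_div(lst[i])
--             same_div_count = True
--             for num in lst[i:j+1]:
--                 if nr_div(num) != k :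
--                     same_div_count = False
--                     break
--             if same_div_count:
--                 if j-i+1 >len(result):
--                     result = lst[i:j+1]
--     return result
-- ===== SOURCE B (Python) =====
-- def _div_count(n):
--     return sum(1 for i in range(1, n + 1) if n % i == 0)
--
-- def get_longest_same_div_count(lst):
--     counts = [_div_count(x) for x in lst]
--     n = len(lst)
--     best = []
--     for i in range(n):
--         j = i
--         while j < n and counts[j] == counts[i]:
--             j += 1
--             if j - i > len(best):
--                 best = lst[i:j]
--     return best
-- ===== Notes on version B (the rewrite author's own statement) =====
-- stated objective: faster
-- what changed: B computes each element's divisor count once into a list, then finds the longest equal-count run by extending each start index until the first mismatch, instead of A's triple loop that recounts divisors over every (i, j) sub-slice.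
import Mathlib
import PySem

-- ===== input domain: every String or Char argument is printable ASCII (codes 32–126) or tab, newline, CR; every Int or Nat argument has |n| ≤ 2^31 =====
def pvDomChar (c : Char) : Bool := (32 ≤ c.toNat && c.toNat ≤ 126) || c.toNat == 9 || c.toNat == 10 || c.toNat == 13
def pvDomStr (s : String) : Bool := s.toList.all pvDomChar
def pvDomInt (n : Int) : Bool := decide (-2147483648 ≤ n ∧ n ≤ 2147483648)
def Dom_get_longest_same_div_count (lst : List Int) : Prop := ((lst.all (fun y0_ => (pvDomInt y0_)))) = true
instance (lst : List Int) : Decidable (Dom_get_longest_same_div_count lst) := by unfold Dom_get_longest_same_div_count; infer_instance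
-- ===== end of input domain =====

-- B computes each element's divisor count once and extends each candidate run until the
-- first mismatch, instead of A's re-counting divisors over every (i, j) sub-slice: faster.

-- ===== PORT A =====
-- nr_div: count of divisors by trying every i in 1..n
def nrDiv (n : Int) : Int :=
  (PySem.List.pyRange 1 (n + 1) 1).foldl
    (fun k i => if PySem.Int.mod n i = 0 then k + 1 else k) 0

-- the 'for num in lst[i:j+1]: if nr_div(num) != k: …; break' loop (flag + break)
def checkSame (k : Int) : List Int → Bool
  | [] => true
  | num :: rest => if nrDiv num ≠ k then false else checkSame k rest

def get_longest_same_div_count (lst : List Int) : List Int :=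
  let l : Int := lst.length
  (PySem.List.pyRange 0 l 1).foldl (fun result i =>
    (PySem.List.pyRange i l 1).foldl (fun result j =>
      let k := nrDiv (PySem.List.pyGetD lst i 0)
      let seg := PySem.List.slice lst (some i) (some (j + 1))
      if checkSame k seg then
        if j - i + 1 > (result.length : Int) then seg else result
      else result) result) []

-- ===== PORT B =====
-- _div_count: sum over 1..n of the 0/1 divisibility indicator
def divCount (n : Int) : Int :=
  (PySem.List.pyRange 1 (n + 1) 1).foldl
    (fun a i => a + (if PySem.Int.mod n i = 0 then 1 else 0)) 0

-- the inner 'while j < n and counts[j] == counts[i]:' loop of B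
def extendRun (lst counts : List Int) (n i : Int) (j : Int) (best : List Int) : List Int :=
  if h : j < n ∧ PySem.List.pyGetD counts j 0 = PySem.List.pyGetD counts i 0 then
    let j' := j + 1
    let best' := if j' - i > (best.length : Int)
                 then PySem.List.slice lst (some i) (some j') else best
    extendRun lst counts n i j' best'
  else best
termination_by (n - j).toNat
decreasing_by omega

def get_longest_same_div_count_alt (lst : List Int) : List Int :=
  let counts := lst.map divCount
  let n : Int := lst.length
  (PySem.List.pyRange 0 n 1).foldl (fun best i => extendRun lst counts n i i best) []

-- ===== PRECONDITION & SPEC =====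
def Spec_get_longest_same_div_count (lst : List Int) (out : List Int) : Prop := out = get_longest_same_div_count_alt lst
instance (lst : List Int) (out : List Int) : Decidable (Spec_get_longest_same_div_count lst out) := by unfold Spec_get_longest_same_div_count; infer_instance

-- ===== CLAIM (what is proved, stated in full; the proofs are below) =====
def Claim_equal_get_longest_same_div_count : Prop := ∀ (lst : List Int), Dom_get_longest_same_div_count lst → Spec_get_longest_same_div_count lst (get_longest_same_div_count lst)

-- ===== LEMMAS AND PROOFS =====

theorem divCount_eq_nrDiv (n : Int) : divCount n = nrDiv n := by
  unfold divCount nrDiv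
  apply PySem.List.foldl_congr_mem
  intro acc x _
  split <;> omega

theorem checkSame_append (k : Int) (xs ys : List Int) :
    checkSame k (xs ++ ys) = (checkSame k xs && checkSame k ys) := by
  induction xs with
  | nil => simp [checkSame]
  | cons x xs ih => by_cases h : nrDiv x ≠ k <;> simp [checkSame, h, ih]

-- slice lst [i:j+1] = slice lst [i:j] ++ [lst[j]]  for 0 ≤ i ≤ j < len
theorem slice_snoc (lst : List Int) (i j : Int) (h0 : 0 ≤ i) (hij : i ≤ j)
    (hj : j < (lst.length : Int)) :
    PySem.List.slice lst (some i) (some (j + 1)) =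
      PySem.List.slice lst (some i) (some j) ++ [PySem.List.pyGetD lst j 0] := by
  rw [PySem.List.slice_toNat lst h0 (by omega), PySem.List.slice_toNat lst h0 (by omega),
    PySem.List.pyGetD_eq_getElem lst 0 (by omega) hj]
  have hb : j.toNat < lst.length := by omega
  have h1 : (j + 1).toNat - i.toNat = (j.toNat - i.toNat) + 1 := by omega
  rw [h1, List.take_add_one]
  congr 1
  have : (lst.drop i.toNat)[j.toNat - i.toNat]? = some lst[j.toNat] := by
    rw [List.getElem?_drop]
    have h2 : i.toNat + (j.toNat - i.toNat) = j.toNat := by omega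
    rw [h2, List.getElem?_eq_getElem hb]
  simp [this]

theorem slice_self (lst : List Int) (i : Int) (h0 : 0 ≤ i) :
    PySem.List.slice lst (some i) (some i) = [] := by
  rw [PySem.List.slice_toNat lst h0 h0]; simp

-- once checkSame fails at some prefix, any longer slice fails too
theorem checkSame_mono_false (k : Int) (lst : List Int) (i j j' : Int)
    (h0 : 0 ≤ i) (hij : i ≤ j) (hjj : j ≤ j')
    (hF : checkSame k (PySem.List.slice lst (some i) (some j)) = false) :
    checkSame k (PySem.List.slice lst (some i) (some j')) = false := by
  rw [PySem.List.slice_toNat lst h0 (by omega)]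
  rw [PySem.List.slice_toNat lst h0 (by omega)] at hF
  have hsplit : j'.toNat - i.toNat = (j.toNat - i.toNat) + (j'.toNat - j.toNat) := by omega
  rw [hsplit, List.take_add, checkSame_append]
  simp [hF]

-- the heart: A's inner fold over j ∈ [j0, n) equals B's extendRun, given the prefix so far is constant
theorem inner_eq (lst counts : List Int) (i : Int) (h0 : 0 ≤ i)
    (hc : counts = lst.map divCount) :
    ∀ (fuel : Nat) (j : Int) (r : List Int), i ≤ j →
    ((lst.length : Int) - j).toNat ≤ fuel →
    checkSame (nrDiv (PySem.List.pyGetD lst i 0)) (PySem.List.slice lst (some i) (some j)) = true →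
    (PySem.List.pyRange j (lst.length : Int) 1).foldl (fun result j =>
      let k := nrDiv (PySem.List.pyGetD lst i 0)
      let seg := PySem.List.slice lst (some i) (some (j + 1))
      if checkSame k seg then
        if j - i + 1 > (result.length : Int) then seg else result
      else result) r
     = extendRun lst counts (lst.length : Int) i j r := by
  intro fuel
  induction fuel with
  | zero =>
    intro j r hij hfuel _
    have hn : (lst.length : Int) ≤ j := by omega
    rw [PySem.List.pyRange_one_eq_nil hn, extendRun,
      dif_neg (by rintro ⟨h1, -⟩; omega)]
    simp only [List.foldl_nil]
  | succ m ih =>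
    intro j r hij hfuel hpre
    by_cases hjn : j < (lst.length : Int)
    · rw [PySem.List.pyRange_one_cons hjn]
      simp only [List.foldl_cons]
      have hd0 : divCount 0 = 0 := by decide
      have hkj : PySem.List.pyGetD counts j 0 = divCount (PySem.List.pyGetD lst j 0) := by
        subst hc
        have := PySem.List.pyGetD_map divCount lst j 0
        rwa [hd0] at this
      have hki : PySem.List.pyGetD counts i 0 = divCount (PySem.List.pyGetD lst i 0) := by
        subst hc
        have := PySem.List.pyGetD_map divCount lst i 0
        rwa [hd0] at this
      have hsnoc := slice_snoc lst i j h0 hij hjn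
      by_cases heq : nrDiv (PySem.List.pyGetD lst j 0) = nrDiv (PySem.List.pyGetD lst i 0)
      · -- counts match: both update and continue
        have hchk : checkSame (nrDiv (PySem.List.pyGetD lst i 0))
            (PySem.List.slice lst (some i) (some (j + 1))) = true := by
          rw [hsnoc, checkSame_append, hpre]
          simp [checkSame, heq]
        rw [extendRun, dif_pos ⟨hjn, by rw [hkj, hki, divCount_eq_nrDiv, divCount_eq_nrDiv]; exact heq⟩]
        simp only [hchk, if_pos]
        have harith : j - i + 1 = j + 1 - i := by omega
        rw [harith]
        exact ih (j + 1) _ (by omega) (by omega) hchk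
      · -- mismatch: A never updates again, B stops
        have hchkF : ∀ j'' : Int, j ≤ j'' →
            checkSame (nrDiv (PySem.List.pyGetD lst i 0))
              (PySem.List.slice lst (some i) (some (j'' + 1))) = false := by
          intro j'' hjj
          apply checkSame_mono_false _ _ _ (j + 1) _ h0 (by omega) (by omega)
          rw [hsnoc, checkSame_append, hpre]
          simp [checkSame, heq]
        rw [extendRun, dif_neg (by
          rintro ⟨-, hcc⟩
          exact heq (by rw [hkj, hki, divCount_eq_nrDiv, divCount_eq_nrDiv] at hcc; exact hcc))]
      -- remaining fold is the identity
        rw [if_neg (by simp [hchkF j le_rfl])]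
        have : ∀ L : List Int, (∀ x ∈ L, j ≤ x) → ∀ r' : List Int,
            L.foldl (fun result j =>
              let k := nrDiv (PySem.List.pyGetD lst i 0)
              let seg := PySem.List.slice lst (some i) (some (j + 1))
              if checkSame k seg then
                if j - i + 1 > (result.length : Int) then seg else result
              else result) r' = r' := by
          intro L
          induction L with
          | nil => intro _ r'; rfl
          | cons x L ihL =>
            intro hmem r'
            simp only [List.foldl_cons]
            rw [if_neg (by simp [hchkF x (hmem x List.mem_cons_self)])]
            exact ihL (fun y hy => hmem y (List.mem_cons_of_mem _ hy)) r'
        exact this _ (fun x hx => by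
          have := (PySem.List.mem_pyRange_one).1 hx; omega) r
    · rw [PySem.List.pyRange_one_eq_nil (by omega)]
      simp only [List.foldl_nil]
      rw [extendRun, dif_neg (by rintro ⟨h1, -⟩; omega)]

-- ===== VERDICT (by name: the statement is the Claim_ definition above) =====
theorem get_longest_same_div_count_spec : Claim_equal_get_longest_same_div_count := by
  intro lst _
  unfold Spec_get_longest_same_div_count
  unfold get_longest_same_div_count get_longest_same_div_count_alt
  simp only []
  apply Eq.symm
  apply PySem.List.foldl_congr_mem
  intro acc i hi
  have hi' := (PySem.List.mem_pyRange_one).1 hi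
  exact Eq.symm <|
    inner_eq lst (lst.map divCount) i hi'.1 rfl (((lst.length : Int) - i).toNat) i acc le_rfl
      le_rfl (by rw [slice_self lst i hi'.1]; rfl)
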